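-- pv_equiv track=rewrite | github.com/kevin-ch-day/ScytaleDroid | scytaledroid/StaticAnalysis/modules/permissions/permission_console_rendering.py | _abbr_from_name
-- ===== SOURCE A (Python) =====
-- def _abbr_from_name(name: str) -> str:
--     base = name if "." not in name else name.split(".")[-1]
--     label = "".join(ch for ch in base if ch.isalnum())
--     if not label:
--         return "APP"
--     up = label.upper()
--     head = up[0]
--     tail = up[1:]
--     no_vowels = "".join(ch for ch in tail if ch not in "AEIOU")
--     token = (head + no_vowels)[:5]
--     return token.ljust(5, " ")
-- ===== SOURCE B (Python) =====
-- def _abbr_from_name(name: str) -> str: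
--     out = []
--     for ch in name:
--         if ch == ".":
--             out = []
--         elif ch.isalnum():
--             u = ch.upper()
--             if not out:
--                 out.append(u)
--             elif len(out) < 5 and u not in "AEIOU":
--                 out.append(u)
--     return "".join(out).ljust(5, " ") if out else "APP"
-- ===== Notes on version B (the rewrite author's own statement) =====
-- stated objective: simpler
-- what changed: Replaced A's multi-pass pipeline (split on the dot separator, alnum-filter join, upper, head/tail split, vowel-strip join, slice, ljust) with one fold over the characters that resets the accumulator at each dot separator, keeps the first alnum char, and then keeps non-vowel alnum chars until five are collected.
import Mathlib
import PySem

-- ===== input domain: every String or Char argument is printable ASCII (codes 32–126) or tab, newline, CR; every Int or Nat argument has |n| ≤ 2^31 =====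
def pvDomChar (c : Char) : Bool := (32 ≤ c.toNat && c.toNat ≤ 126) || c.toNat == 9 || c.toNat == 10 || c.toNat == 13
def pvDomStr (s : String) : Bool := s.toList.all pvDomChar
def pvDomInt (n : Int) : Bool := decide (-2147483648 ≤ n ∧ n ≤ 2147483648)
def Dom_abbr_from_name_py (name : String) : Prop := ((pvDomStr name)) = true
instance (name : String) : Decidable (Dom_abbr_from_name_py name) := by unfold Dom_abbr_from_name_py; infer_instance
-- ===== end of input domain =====

-- B replaces A's multi-pass pipeline (split on the dot separator, alnum filter, upper, vowel-strip, slice, pad)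
-- by a single left-to-right fold over the characters that resets its accumulator at each dot separator; objective: simpler (one pass, no intermediate strings).


-- ===== PORT A =====
-- literal transliteration of A, on List Char (PySem.Chars is the code-point model of str)
def abbr_from_name_py (name : String) : String :=
  -- base = name if "." not in name else name.split(".")[-1]
  let base : List Char :=
    if PySem.Str.isIn "." name = false then name.toList
    else (PySem.List.pyGet? (PySem.Chars.splitOn name.toList ['.']) (-1)).getD []
      -- the .getD [] never fires: str.split always returns a nonempty list
  -- label = "".join(ch for ch in base if ch.isalnum())
  let label : List Char := base.filter PySem.Chars.isalnum
  if label = [] then "APP"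
  else
    let up := PySem.Chars.upper label
    -- head = up[0]  (up ≠ [], so the .getD default never fires)
    let head : Char := (PySem.List.pyGet? up 0).getD ' '
    -- tail = up[1:]
    let tail := PySem.List.slice up (some 1) none
    -- no_vowels = "".join(ch for ch in tail if ch not in "AEIOU")
    let no_vowels := tail.filter (fun ch => !("AEIOU".toList.contains ch))
    -- token = (head + no_vowels)[:5]
    let token := PySem.List.slice (head :: no_vowels) none (some 5)
    -- return token.ljust(5, " ")
    String.ofList (token ++ List.replicate (5 - token.length) ' ')

-- ===== PORT B =====
-- one step of B's loop body (the body of 'for ch in name')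
def pvBStep (out : List Char) (ch : Char) : List Char :=
  if ch = '.' then []
  else if PySem.Chars.isalnum ch then
    let u := PySem.Chars.upperChar ch
    if out = [] then [u]
    else if out.length < 5 && !("AEIOU".toList.contains u) then out ++ [u]
    else out
  else out

def abbr_from_name_py_alt (name : String) : String :=
  let out := name.toList.foldl pvBStep []
  if out = [] then "APP"
  else String.ofList (out ++ List.replicate (5 - out.length) ' ')

-- ===== PRECONDITION & SPEC =====
def Spec_abbr_from_name_py (name : String) (out : String) : Prop := out = abbr_from_name_py_alt name
instance (name : String) (out : String) : Decidable (Spec_abbr_from_name_py name out) := by unfold Spec_abbr_from_name_py; infer_instance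

-- ===== CLAIM (what is proved, stated in full; the proofs are below) =====
def Claim_equal_abbr_from_name_py : Prop := ∀ (name : String), Dom_abbr_from_name_py name → Spec_abbr_from_name_py name (abbr_from_name_py name)

-- ===== LEMMAS AND PROOFS =====

-- the segment of l after its last '.', accumulated left to right
def pvLastSeg (pre : List Char) : List Char → List Char
  | [] => pre
  | c :: r => if c = '.' then pvLastSeg [] r else pvLastSeg (pre ++ [c]) r

-- the abbreviation token (unpadded) of one segment, as A computes it
def pvTok (seg : List Char) : List Char :=
  match (seg.filter PySem.Chars.isalnum).map PySem.Chars.upperChar with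
  | [] => []
  | h :: t => (h :: t.filter (fun ch => !("AEIOU".toList.contains ch))).take 5

-- the pieces str.split(".") produces, built left to right
def pvSplitParts (pre : List Char) : List Char → List (List Char)
  | [] => [pre]
  | c :: r => if c = '.' then pre :: pvSplitParts [] r else pvSplitParts (pre ++ [c]) r

theorem pvSplitOn_go_spec (l : List Char) : ∀ (fuel : Nat) (cur : List Char) (acc : List (List Char)),
    l.length ≤ fuel →
    PySem.Chars.splitOn.go ['.'] fuel l cur acc = acc.reverse ++ pvSplitParts cur.reverse l := by
  induction l with
  | nil =>
    intro fuel cur acc _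
    cases fuel <;> simp [PySem.Chars.splitOn.go, pvSplitParts]
  | cons c r ih =>
    intro fuel cur acc hf
    cases fuel with
    | zero => simp at hf
    | succ f =>
      by_cases hc : c = '.'
      · subst hc
        rw [show PySem.Chars.splitOn.go ['.'] (f+1) ('.' :: r) cur acc
              = PySem.Chars.splitOn.go ['.'] f r [] (cur.reverse :: acc) by
            simp [PySem.Chars.splitOn.go, List.isPrefixOf]]
        rw [ih f [] _ (by simpa using hf)]
        simp [pvSplitParts]
      · rw [show PySem.Chars.splitOn.go ['.'] (f+1) (c :: r) cur acc
              = PySem.Chars.splitOn.go ['.'] f r (c :: cur) acc by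
            simp [PySem.Chars.splitOn.go, List.isPrefixOf, Ne.symm hc]]
        rw [ih f _ _ (by simpa using hf)]
        simp [pvSplitParts, hc]

theorem pvSplitParts_ne_nil (pre : List Char) (l : List Char) : pvSplitParts pre l ≠ [] := by
  induction l generalizing pre with
  | nil => simp [pvSplitParts]
  | cons c r ih => simp only [pvSplitParts]; split <;> simp [ih]

theorem pvSplitParts_getLast (pre : List Char) (l : List Char) :
    (pvSplitParts pre l).getLast? = some (pvLastSeg pre l) := by
  induction l generalizing pre with
  | nil => simp [pvSplitParts, pvLastSeg]
  | cons c r ih =>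
    simp only [pvSplitParts, pvLastSeg]; split
    · cases hps : pvSplitParts [] r with
      | nil => exact absurd hps (pvSplitParts_ne_nil [] r)
      | cons a t =>
        have := ih []
        rw [hps] at this
        simp [List.getLast?_cons] at this ⊢
        simpa using this
    · exact ih _

theorem pvLastSeg_no_dot (pre : List Char) (l : List Char) (h : '.' ∉ l) :
    pvLastSeg pre l = pre ++ l := by
  induction l generalizing pre with
  | nil => simp [pvLastSeg]
  | cons c r ih =>
    simp only [pvLastSeg]
    rw [if_neg (by rintro rfl; exact h (by simp))]
    rw [ih _ (fun hm => h (by simp [hm]))]; simp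

theorem pvBStep_tok (pre : List Char) (c : Char) (hc : c ≠ '.') :
    pvBStep (pvTok pre) c = pvTok (pre ++ [c]) := by
  by_cases ha : PySem.Chars.isalnum c
  · have hfilter : (pre ++ [c]).filter PySem.Chars.isalnum = pre.filter PySem.Chars.isalnum ++ [c] := by
      simp [List.filter_append, ha]
    set u := PySem.Chars.upperChar c with hu
    cases hM : (pre.filter PySem.Chars.isalnum).map PySem.Chars.upperChar with
    | nil => simp [pvTok, pvBStep, hfilter, hM, hc, ha]
    | cons h t =>
      by_cases hv : "AEIOU".toList.contains u
      · have hv' : u = 'A' ∨ u = 'E' ∨ u = 'I' ∨ u = 'O' ∨ u = 'U' := by simpa using hv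
        rcases hv' with h'|h'|h'|h'|h' <;>
          simp [pvTok, pvBStep, hfilter, hM, List.filter_append, hc, ha, ← hu, h',
            List.take_succ_cons]
      · have hv' : ¬u = 'A' ∧ ¬u = 'E' ∧ ¬u = 'I' ∧ ¬u = 'O' ∧ ¬u = 'U' := by simpa using hv
        obtain ⟨n1, n2, n3, n4, n5⟩ := hv'
        simp [pvTok, pvBStep, hfilter, hM, List.filter_append, hc, ha, ← hu, n1, n2, n3, n4, n5,
          List.take_succ_cons, List.take_append]
        set ft := List.filter (fun ch =>
            !decide (ch = 'A') && (!decide (ch = 'E') && (!decide (ch = 'I') &&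
              (!decide (ch = 'O') && !decide (ch = 'U'))))) t with hft
        by_cases hlen : ft.length < 4
        · rw [if_pos (by omega), List.take_of_length_le (by omega : ft.length ≤ 4),
            List.take_of_length_le (by simp; omega : ([u]).length ≤ 4 - ft.length)]
        · rw [if_neg (by omega)]
          have : List.take (4 - ft.length) [u] = [] := by
            rw [show 4 - ft.length = 0 by omega]; rfl
          rw [this, List.append_nil]
  · simp [pvTok, pvBStep, hc, ha, List.filter_append]

theorem pvFoldl_tok (l : List Char) : ∀ (pre : List Char),
    l.foldl pvBStep (pvTok pre) = pvTok (pvLastSeg pre l) := by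
  induction l with
  | nil => intro pre; simp [pvLastSeg]
  | cons c r ih =>
    intro pre
    by_cases hc : c = '.'
    · subst hc
      have : pvBStep (pvTok pre) '.' = pvTok [] := by simp [pvBStep, pvTok]
      simp only [List.foldl_cons, this, ih [], pvLastSeg]
      simp
    · simp only [List.foldl_cons, pvBStep_tok pre c hc, ih (pre ++ [c]), pvLastSeg, if_neg hc]

theorem pv_not_isIn (s : String) (h : PySem.Str.isIn "." s = false) : '.' ∉ s.toList := by
  intro hm
  obtain ⟨l1, l2, he⟩ := List.append_of_mem hm
  have := (PySem.Str.isIn_iff_infix (sub := ".") (s := s)).mpr ⟨l1, l2, by simp [he]⟩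
  rw [this] at h; exact absurd h (by simp)

theorem pv_pyGet_neg_one {α : Type} (xs : List α) (h : xs ≠ []) :
    PySem.List.pyGet? xs (-1) = xs.getLast? := by
  have hn : 0 < xs.length := List.length_pos_of_ne_nil h
  rw [PySem.List.pyGet?, PySem.List.pyIdx?]
  rw [if_neg (by omega), if_pos (by omega)]
  simp [List.getLast?_eq_getElem?]

theorem pv_base_eq (name : String) :
    (if PySem.Str.isIn "." name = false then name.toList
     else (PySem.List.pyGet? (PySem.Chars.splitOn name.toList ['.']) (-1)).getD [])
      = pvLastSeg [] name.toList := by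
  by_cases hdot : PySem.Str.isIn "." name = false
  · rw [if_pos hdot, pvLastSeg_no_dot [] _ (pv_not_isIn name hdot)]; simp
  · rw [if_neg hdot]
    have hsp : PySem.Chars.splitOn name.toList ['.'] = pvSplitParts [] name.toList := by
      rw [PySem.Chars.splitOn]
      simpa using pvSplitOn_go_spec name.toList (name.toList.length + 1) [] [] (by omega)
    rw [hsp, pv_pyGet_neg_one _ (pvSplitParts_ne_nil [] _), pvSplitParts_getLast]
    rfl

-- ===== VERDICT (by name: the statement is the Claim_ definition above) =====
theorem abbr_from_name_py_spec : Claim_equal_abbr_from_name_py := by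
  intro name _
  unfold Spec_abbr_from_name_py
  have hB : abbr_from_name_py_alt name =
      (if pvTok (pvLastSeg [] name.toList) = [] then "APP"
       else String.ofList (pvTok (pvLastSeg [] name.toList) ++
         List.replicate (5 - (pvTok (pvLastSeg [] name.toList)).length) ' ')) := by
    have h0 : name.toList.foldl pvBStep [] = pvTok (pvLastSeg [] name.toList) := by
      simpa [pvTok] using pvFoldl_tok name.toList []
    simp [abbr_from_name_py_alt, h0]
  rw [hB]
  rw [abbr_from_name_py]
  simp only [pv_base_eq name]
  cases hM : ((pvLastSeg [] name.toList).filter PySem.Chars.isalnum).map PySem.Chars.upperChar with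
  | nil =>
    have hlab : (pvLastSeg [] name.toList).filter PySem.Chars.isalnum = [] := by simpa using hM
    simp [hlab, pvTok]
  | cons h t =>
    have hlab : (pvLastSeg [] name.toList).filter PySem.Chars.isalnum ≠ [] := by
      intro he; rw [he] at hM; simp at hM
    rw [if_neg hlab]
    rw [if_neg (by simp [pvTok, hM, List.take_succ_cons])]
    have hup : PySem.Chars.upper ((pvLastSeg [] name.toList).filter PySem.Chars.isalnum) = h :: t := by
      rw [PySem.Chars.upper]; exact hM
    rw [hup]
    have hhead : (PySem.List.pyGet? (h :: t) 0).getD ' ' = h := by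
      simp [PySem.List.pyGet?, PySem.List.pyIdx?]
    rw [hhead, PySem.List.slice_from_one, PySem.List.slice_to _ (by norm_num)]
    simp [pvTok, hM, List.take_succ_cons]
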